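-- pv_equiv track=rewrite | github.com/yinwm/nanobot | nanobot/channels/feishu_markdown.py | should_render_markdown
-- ===== SOURCE A (Python) =====
-- def should_render_markdown(text: str) -> bool:
--     """
--     Determine if text contains markdown that should be rendered.
--
--     Returns True if text contains markdown syntax, False for plain text.
--     """
--     markdown_indicators = [
--         "```",  # code blocks
--         "**",   # bold
--         "__",   # bold
--         "*",    # italic/bold
--         "_",    # italic
--         "[",    # links
--         "#",    # headings
--         "-",    # lists
--         "1.",   # ordered lists
--         ">",    # blockquotes
--         "`",    # inline code
--     ]
--
--     return any(indicator in text for indicator in markdown_indicators)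
-- ===== SOURCE B (Python) =====
-- def should_render_markdown(text: str) -> bool:
--     """Single pass: any one-char marker (which subsume '```','**','__') or the '1.' substring."""
--     markers = {'*', '_', '[', '#', '-', '>', '`'}
--     for ch in text:
--         if ch in markers:
--             return True
--     return "1." in text
-- ===== Notes on version B (the rewrite author's own statement) =====
-- stated objective: simpler
-- what changed: Replaces the per-indicator substring scan (11 'in' searches) by one pass over the characters against a 7-char marker set (the multi-char indicators are subsumed by their single-char ones) plus a single substring test for the two-char ordered-list indicator.
import Mathlib
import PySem

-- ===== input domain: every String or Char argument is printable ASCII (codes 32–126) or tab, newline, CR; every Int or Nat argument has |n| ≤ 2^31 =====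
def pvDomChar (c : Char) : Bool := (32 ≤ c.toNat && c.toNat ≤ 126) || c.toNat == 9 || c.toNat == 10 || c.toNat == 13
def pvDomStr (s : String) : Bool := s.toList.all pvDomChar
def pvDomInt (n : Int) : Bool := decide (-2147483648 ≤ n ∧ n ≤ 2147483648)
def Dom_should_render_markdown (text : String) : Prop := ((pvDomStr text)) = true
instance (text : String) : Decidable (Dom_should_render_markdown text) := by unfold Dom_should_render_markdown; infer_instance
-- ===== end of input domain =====

-- B replaces A's eleven per-indicator substring scans by one pass over the characters against a
-- 7-element single-char marker set (which subsumes "```"/"**"/"__") plus one "1." substring test; objective: simpler.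

-- ===== PORT A =====
def should_render_markdown (text : String) : Bool :=
  ["```", "**", "__", "*", "_", "[", "#", "-", "1.", ">", "`"].any
    (fun indicator => PySem.Str.isIn indicator text)

-- ===== PORT B =====
def pvMarkers : PySem.Set Char := PySem.Set.ofList ['*', '_', '[', '#', '-', '>', '`']

def should_render_markdown_alt (text : String) : Bool :=
  -- the for-loop with early 'return True' is List.any over the characters
  if text.toList.any (fun ch => PySem.Set.contains pvMarkers ch) then true
  else PySem.Str.isIn "1." text

-- ===== PRECONDITION & SPEC =====
def Spec_should_render_markdown (text : String) (out : Bool) : Prop := out = should_render_markdown_alt text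
instance (text : String) (out : Bool) : Decidable (Spec_should_render_markdown text out) := by unfold Spec_should_render_markdown; infer_instance

-- ===== CLAIM (what is proved, stated in full; the proofs are below) =====
def Claim_equal_should_render_markdown : Prop := ∀ (text : String), Dom_should_render_markdown text → Spec_should_render_markdown text (should_render_markdown text)

-- ===== LEMMAS AND PROOFS =====

-- ===== VERDICT (by name: the statement is the Claim_ definition above) =====
theorem should_render_markdown_spec : Claim_equal_should_render_markdown := by
  intro text _
  unfold Spec_should_render_markdown should_render_markdown should_render_markdown_alt
  rw [Bool.eq_iff_iff]
  simp only [List.any_cons, List.any_nil, Bool.or_eq_true, Bool.or_false,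
    PySem.Str.isIn_iff_infix, List.any_eq_true, Bool.if_true_left,
    PySem.Set.contains_iff, pvMarkers, decide_eq_true_eq, PySem.Set.mem_ofList,
    show ("```".toList : List Char) = ['`','`','`'] from rfl,
    show ("**".toList : List Char) = ['*','*'] from rfl,
    show ("__".toList : List Char) = ['_','_'] from rfl,
    show ("*".toList : List Char) = ['*'] from rfl,
    show ("_".toList : List Char) = ['_'] from rfl,
    show ("[".toList : List Char) = ['['] from rfl,
    show ("#".toList : List Char) = ['#'] from rfl,
    show ("-".toList : List Char) = ['-'] from rfl,
    show (">".toList : List Char) = ['>'] from rfl,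
    show ("`".toList : List Char) = ['`'] from rfl,
    List.singleton_infix_iff]
  constructor
  · rintro (h | h | h | h | h | h | h | h | h | h | h)
    · exact Or.inl ⟨'`', h.subset (by decide), by decide⟩
    · exact Or.inl ⟨'*', h.subset (by decide), by decide⟩
    · exact Or.inl ⟨'_', h.subset (by decide), by decide⟩
    · exact Or.inl ⟨'*', h, by decide⟩
    · exact Or.inl ⟨'_', h, by decide⟩
    · exact Or.inl ⟨'[', h, by decide⟩
    · exact Or.inl ⟨'#', h, by decide⟩
    · exact Or.inl ⟨'-', h, by decide⟩
    · exact Or.inr h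
    · exact Or.inl ⟨'>', h, by decide⟩
    · exact Or.inl ⟨'`', h, by decide⟩
  · rintro (⟨c, hc, hm⟩ | h)
    · fin_cases hm <;> tauto
    · tauto
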